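-- pv_equiv track=rewrite | github.com/VeganPorkChop/CS-Assignments | CS-150/Lab2/optimize.py | dna_optimize
-- ===== SOURCE A (Python) =====
-- def dna_optimize(starting, insertion, target):
--     """
--     Returns the index to insert the sequence "insertion"
--       to "starting" to perfectly match "target"
--     If multiple such indices exist, return the earliest one
--     If no such index exists, instead returns -1
--     """
--     # Try every index of the starting string
--     for index in range(len(starting) + 1):
--         # Slice the starting sequence _through_ index,
--         #   insert our extra sequence,
--         #   then add the rest of the starting sequence
--         attempt = starting[:index]
--         attempt = attempt + insertion
--         attempt = attempt + starting[index:]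
--
--         # If it's a perfect match, return this index!
--         if attempt == target:
--             return index
--
--     return -1
-- ===== SOURCE B (Python) =====
-- def dna_optimize(starting, insertion, target):
--     """
--     Earliest index at which inserting `insertion` into `starting` yields
--     `target`, or -1.  O(n) instead of A's O(n^2): an index i works iff
--     i <= lcp(starting, target), len(starting) - i <= common suffix length,
--     and insertion occurs in target at i; the earliest such i is the first
--     occurrence of insertion in target at or after n - suffix, if it is
--     within the common prefix.
--     """
--     n, m = len(starting), len(insertion)
--     if n + m != len(target):
--         return -1
--     p = _lcp(starting, target)
--     s = _lcp(starting[::-1], target[::-1])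
--     lo = n - s if n > s else 0
--     i = target.find(insertion, lo)
--     return i if 0 <= i <= p else -1
--
--
-- def _lcp(a, b):
--     k = 0
--     for x, y in zip(a, b):
--         if x != y:
--             return k
--         k += 1
--     return k
-- ===== Notes on version B (the rewrite author's own statement) =====
-- stated objective: faster
-- what changed: Instead of rebuilding and comparing a candidate string for every insertion index, B computes the common prefix and suffix lengths of starting and target once and finds the earliest occurrence of insertion in target within the valid window with one str.find call.
import Mathlib
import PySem

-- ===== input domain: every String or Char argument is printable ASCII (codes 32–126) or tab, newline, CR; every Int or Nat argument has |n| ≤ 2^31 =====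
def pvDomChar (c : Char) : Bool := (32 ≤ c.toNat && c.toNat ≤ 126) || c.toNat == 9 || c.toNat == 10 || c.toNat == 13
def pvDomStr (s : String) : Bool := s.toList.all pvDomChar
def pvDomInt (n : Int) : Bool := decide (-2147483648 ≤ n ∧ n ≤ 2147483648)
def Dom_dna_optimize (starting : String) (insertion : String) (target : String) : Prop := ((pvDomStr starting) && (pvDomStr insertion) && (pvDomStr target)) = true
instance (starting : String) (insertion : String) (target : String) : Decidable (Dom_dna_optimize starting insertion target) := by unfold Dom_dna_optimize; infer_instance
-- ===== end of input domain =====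

-- B replaces A's try-every-index-and-rebuild O(n^2) scan by one common-prefix/suffix
-- computation plus a single str.find call (O(n)); return values are proved equal on all inputs.

-- ===== PORT A =====
-- A's for-loop over range(len(starting)+1) with early return, on code-point lists;
-- starting[:index] and starting[index:] are PySem.List.slice (exact Python slices).
def dnaTryA (st ins tg : List Char) : List Nat → Int
  | [] => -1
  | i :: rest =>
      if PySem.List.slice st none (some (i : Int)) ++ ins ++ PySem.List.slice st (some (i : Int)) none = tg
      then (i : Int) else dnaTryA st ins tg rest

def dna_optimize (starting : String) (insertion : String) (target : String) : Int :=
  dnaTryA starting.toList insertion.toList target.toList (List.range (starting.toList.length + 1))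

-- ===== PORT B =====
-- Source B's _lcp: walks zip(a, b), returning the count at the first mismatch.
def lcpB : List Char → List Char → Nat
  | x :: xs, y :: ys => if x ≠ y then 0 else lcpB xs ys + 1
  | _, _ => 0

def dna_optimize_alt (starting : String) (insertion : String) (target : String) : Int :=
  let st := starting.toList
  let ins := insertion.toList
  let tg := target.toList
  let n := st.length
  let m := ins.length
  if n + m ≠ tg.length then -1
  else
    let p := lcpB st tg
    let s := lcpB st.reverse tg.reverse            -- starting[::-1], target[::-1]
    let lo := if s < n then n - s else 0           -- n - s if n > s else 0
    let i := PySem.Chars.findFrom tg ins ((lo : Nat) : Int) none  -- target.find(insertion, lo)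
    if 0 ≤ i ∧ i ≤ (p : Int) then i else -1

-- ===== PRECONDITION & SPEC =====
def Spec_dna_optimize (starting : String) (insertion : String) (target : String) (out : Int) : Prop := out = dna_optimize_alt starting insertion target
instance (starting : String) (insertion : String) (target : String) (out : Int) : Decidable (Spec_dna_optimize starting insertion target out) := by unfold Spec_dna_optimize; infer_instance

-- ===== CLAIM (what is proved, stated in full; the proofs are below) =====
def Claim_equal_dna_optimize : Prop := ∀ (starting : String) (insertion : String) (target : String), Dom_dna_optimize starting insertion target → Spec_dna_optimize starting insertion target (dna_optimize starting insertion target)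

-- ===== LEMMAS AND PROOFS =====

-- "inserting ins into st at i gives tg" — the condition A tests at index i
def OkAt (st ins tg : List Char) (i : Nat) : Prop :=
  st.take i ++ ins ++ st.drop i = tg

lemma dnaTryA_cond (st ins tg : List Char) (i : Nat) (rest : List Nat) :
    dnaTryA st ins tg (i :: rest) =
      if st.take i ++ ins ++ st.drop i = tg then (i : Int) else dnaTryA st ins tg rest := by
  simp [dnaTryA, PySem.List.slice_to_natCast, PySem.List.slice_from_natCast]

lemma dnaTryA_none (st ins tg : List Char) (l : List Nat)
    (h : ∀ i ∈ l, ¬ OkAt st ins tg i) : dnaTryA st ins tg l = -1 := by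
  induction l with
  | nil => rfl
  | cons i rest ih =>
      have hc : ¬ (st.take i ++ ins ++ st.drop i = tg) := h i (List.mem_cons_self ..)
      rw [dnaTryA_cond, if_neg hc]
      exact ih fun j hj => h j (List.mem_cons_of_mem _ hj)

lemma dnaTryA_first (st ins tg : List Char) (l1 l2 : List Nat) (i0 : Nat)
    (h1 : ∀ i ∈ l1, ¬ OkAt st ins tg i) (h0 : OkAt st ins tg i0) :
    dnaTryA st ins tg (l1 ++ i0 :: l2) = (i0 : Int) := by
  induction l1 with
  | nil =>
      have hc : st.take i0 ++ ins ++ st.drop i0 = tg := h0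
      rw [List.nil_append, dnaTryA_cond, if_pos hc]
  | cons i rest ih =>
      have hc : ¬ (st.take i ++ ins ++ st.drop i = tg) := h1 i (List.mem_cons_self ..)
      rw [List.cons_append, dnaTryA_cond, if_neg hc]
      exact ih fun j hj => h1 j (List.mem_cons_of_mem _ hj)

lemma lcpB_le_left : ∀ (a b : List Char), lcpB a b ≤ a.length := by
  intro a
  induction a with
  | nil => intro b; cases b <;> simp [lcpB]
  | cons x xs ih =>
      intro b
      cases b with
      | nil => simp [lcpB]
      | cons y ys =>
          simp only [lcpB]
          split <;> simp [Nat.succ_le_succ (ih ys)]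

lemma lcpB_take : ∀ (a b : List Char) (i : Nat), i ≤ a.length → i ≤ b.length →
    (a.take i = b.take i ↔ i ≤ lcpB a b) := by
  intro a
  induction a with
  | nil =>
      intro b i hi _
      have : i = 0 := by simpa using hi
      subst this; simp
  | cons x xs ih =>
      intro b i hi hib
      cases b with
      | nil =>
          have : i = 0 := by simpa using hib
          subst this; simp
      | cons y ys =>
          cases i with
          | zero => simp
          | succ j =>
              by_cases hxy : x = y
              · subst hxy
                simp only [List.take_succ_cons, List.cons.injEq, true_and, lcpB, ne_eq,
                  not_true_eq_false, if_false]
                rw [ih ys j (by simpa using hi) (by simpa using hib)]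
                omega
              · simp [lcpB, hxy]

lemma okAt_len (st ins tg : List Char) (i : Nat) (hi : i ≤ st.length)
    (h : OkAt st ins tg i) : st.length + ins.length = tg.length := by
  have := congrArg List.length h
  simp only [List.length_append, List.length_take, List.length_drop] at this
  omega

-- the decomposition of OkAt into prefix bound / suffix bound / occurrence of ins in tg
lemma okAt_iff (st ins tg : List Char) (i : Nat)
    (hlen : st.length + ins.length = tg.length) (hi : i ≤ st.length) :
    OkAt st ins tg i ↔
      (i ≤ lcpB st tg ∧ st.length - lcpB st.reverse tg.reverse ≤ i ∧ ins <+: tg.drop i) := by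
  have hntg : st.length ≤ tg.length := by omega
  have hti : (st.take i).length = i := by simp [List.length_take]; omega
  have hrev1 : st.drop i = (st.reverse.take (st.length - i)).reverse := by
    conv_lhs => rw [← List.reverse_reverse (st.drop i)]
    rw [List.reverse_drop]
  have hrev2 : tg.drop (i + ins.length) = (tg.reverse.take (st.length - i)).reverse := by
    conv_lhs => rw [← List.reverse_reverse (tg.drop (i + ins.length))]
    rw [List.reverse_drop, show tg.length - (i + ins.length) = st.length - i by omega]
  constructor
  · intro h
    have h' : st.take i ++ (ins ++ st.drop i) = tg := by
      rw [← List.append_assoc]; exact h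
    have hpre : st.take i = tg.take i := by
      have := congrArg (List.take i) h'
      rwa [List.take_left' hti] at this
    have hdropi : tg.drop i = ins ++ st.drop i := by
      have := congrArg (List.drop i) h'
      rw [List.drop_left' hti] at this
      exact this.symm
    have hsuffix : st.drop i = tg.drop (i + ins.length) := by
      have hdd : (tg.drop i).drop ins.length = tg.drop (i + ins.length) := List.drop_drop ..
      rw [hdropi, List.drop_left' rfl] at hdd
      exact hdd
    refine ⟨(lcpB_take st tg i hi (by omega)).mp hpre, ?_, ⟨st.drop i, hdropi.symm⟩⟩
    have hrevtake : st.reverse.take (st.length - i) = tg.reverse.take (st.length - i) := by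
      have := hsuffix
      rw [hrev1, hrev2] at this
      exact List.reverse_injective this
    have := (lcpB_take st.reverse tg.reverse (st.length - i)
      (by simp only [List.length_reverse]; omega)
      (by simp only [List.length_reverse]; omega)).mp hrevtake
    omega
  · rintro ⟨hp, hs, t, ht⟩
    have hslen : lcpB st.reverse tg.reverse ≤ st.length := by
      have := lcpB_le_left st.reverse tg.reverse
      simpa using this
    have hrevtake : st.reverse.take (st.length - i) = tg.reverse.take (st.length - i) :=
      (lcpB_take st.reverse tg.reverse (st.length - i)
        (by simp only [List.length_reverse]; omega)
        (by simp only [List.length_reverse]; omega)).mpr (by omega)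
    have hsuffix : st.drop i = tg.drop (i + ins.length) := by
      rw [hrev1, hrev2, hrevtake]
    have hpre : st.take i = tg.take i := (lcpB_take st tg i hi (by omega)).mpr hp
    have hteq : t = tg.drop (i + ins.length) := by
      have := congrArg (List.drop ins.length) ht
      rw [List.drop_left' rfl, List.drop_drop] at this
      exact this
    have hdropi : tg.drop i = ins ++ st.drop i := by
      rw [← ht, hteq, ← hsuffix]
    show st.take i ++ ins ++ st.drop i = tg
    rw [List.append_assoc, hpre, ← hdropi, List.take_append_drop]

lemma prefix_infix_of_le (ins tg : List Char) (lo i : Nat) (hloi : lo ≤ i)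
    (h : ins <+: tg.drop i) : ins <:+: tg.drop lo := by
  have hsub : tg.drop i = (tg.drop lo).drop (i - lo) := by
    rw [List.drop_drop]; congr 1; omega
  exact h.isInfix.trans (hsub ▸ (List.drop_suffix (i - lo) (tg.drop lo))).isInfix

lemma main_lists (st ins tg : List Char) :
    dnaTryA st ins tg (List.range (st.length + 1)) =
      (if st.length + ins.length ≠ tg.length then -1
       else if 0 ≤ PySem.Chars.findFrom tg ins (((if lcpB st.reverse tg.reverse < st.length then st.length - lcpB st.reverse tg.reverse else 0 : Nat)) : Int) none ∧ PySem.Chars.findFrom tg ins (((if lcpB st.reverse tg.reverse < st.length then st.length - lcpB st.reverse tg.reverse else 0 : Nat)) : Int) none ≤ (lcpB st tg : Int)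
            then PySem.Chars.findFrom tg ins (((if lcpB st.reverse tg.reverse < st.length then st.length - lcpB st.reverse tg.reverse else 0 : Nat)) : Int) none
            else -1) := by
  by_cases hlen : st.length + ins.length = tg.length
  · rw [if_neg (by omega)]
    set n := st.length with hn
    set p := lcpB st tg with hp
    set s := lcpB st.reverse tg.reverse with hs
    set lo := (if s < n then n - s else 0) with hlo
    have hlons : lo = n - s := by rw [hlo]; split <;> omega
    have hpn : p ≤ n := lcpB_le_left st tg
    have hlole : lo ≤ tg.length := by omega
    set f := PySem.Chars.findFrom tg ins ((lo : Nat) : Int) none with hf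
    by_cases hf1 : f = -1
    · have hninf : ¬ ins <:+: tg.drop lo :=
        (PySem.Chars.findFrom_natCast_eq_neg_one_iff tg ins lo hlole).mp hf1
      rw [dnaTryA_none st ins tg _ ?_]
      · rw [hf1]; norm_num
      · intro j hj hok
        have hjn : j ≤ n := by have := List.mem_range.mp hj; omega
        obtain ⟨_, hjs, hjocc⟩ := (okAt_iff st ins tg j hlen hjn).mp hok
        exact hninf (prefix_infix_of_le ins tg lo j (by omega) hjocc)
    · obtain ⟨hge, hocc, hmin⟩ := PySem.Chars.findFrom_natCast_spec tg ins lo hlole hf1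
      have hf0 : (0 : Int) ≤ f := le_trans (by positivity) hge
      set i0 := f.toNat with hi0
      have hfi0 : f = (i0 : Int) := (Int.toNat_of_nonneg hf0).symm
      have hgeN : lo ≤ i0 := by omega
      by_cases hip : i0 ≤ p
      · have hi0n : i0 ≤ n := le_trans hip hpn
        have hok : OkAt st ins tg i0 :=
          (okAt_iff st ins tg i0 hlen hi0n).mpr ⟨hip, by omega, hocc⟩
        have hmin' : ∀ j < i0, ¬ OkAt st ins tg j := by
          intro j hj hok'
          have hjn : j ≤ n := le_trans (le_of_lt hj) hi0n
          obtain ⟨_, hjs, hjocc⟩ := (okAt_iff st ins tg j hlen hjn).mp hok'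
          exact hmin j (by omega) hj hjocc
        have hsplit : List.range (n + 1) =
            List.range i0 ++ i0 :: ((List.range (n - i0)).map Nat.succ).map (i0 + ·) := by
          rw [show n + 1 = i0 + (n + 1 - i0) by omega, List.range_add,
            show n + 1 - i0 = (n - i0) + 1 by omega, List.range_succ_eq_map]
          simp
        rw [hsplit,
          dnaTryA_first st ins tg _ _ i0 (fun j hj => hmin' j (List.mem_range.mp hj)) hok]
        rw [if_pos ⟨hf0, by omega⟩, hfi0]
      · rw [if_neg (by rintro ⟨-, hle⟩; rw [hfi0] at hle; exact hip (by exact_mod_cast hle))]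
        rw [dnaTryA_none st ins tg _ ?_]
        intro j hj hok
        have hjn : j ≤ n := by have := List.mem_range.mp hj; omega
        obtain ⟨hjp, hjs, hjocc⟩ := (okAt_iff st ins tg j hlen hjn).mp hok
        exact hmin j (by omega) (by omega) hjocc
  · rw [if_pos (by omega)]
    apply dnaTryA_none
    intro j hj hok
    have hjn : j ≤ st.length := by have := List.mem_range.mp hj; omega
    exact hlen (okAt_len st ins tg j hjn hok)

-- ===== VERDICT (by name: the statement is the Claim_ definition above) =====
theorem dna_optimize_spec : Claim_equal_dna_optimize := by
  intro starting insertion target _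
  unfold Spec_dna_optimize dna_optimize dna_optimize_alt
  exact main_lists starting.toList insertion.toList target.toList
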